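-- pv_equiv track=rewrite | github.com/Doggzone/cse1017 | examfinal2021/examB-sol.py | fill_the_gap
-- ===== SOURCE A (Python) =====
-- def fill_the_gap(ms):
--     def loop(ms,ns):
--         if ms != []:
--             last = ns[len(ns)-1]
--             nxt = ms[0]
--             if last > nxt:
--                 while last > nxt:
--                     last -= 1
--                     ns.append(last)
--             elif last < nxt:
--                 while last < nxt:
--                     last += 1
--                     ns.append(last)
--             else:
--                 ns.append(nxt)
--             return loop(ms[1:],ns)
--         else:
--             return ns
--     if ms != []:
--         return loop(ms[1:],[ms[0]])
--     else:
--         return []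
-- ===== SOURCE B (Python) =====
-- def fill_the_gap(ms):
--     if not ms:
--         return []
--     out = [ms[0]]
--     for a, b in zip(ms, ms[1:]):
--         if a < b:
--             out.extend(range(a + 1, b + 1))
--         elif a > b:
--             out.extend(range(a - 1, b - 1, -1))
--         else:
--             out.append(b)
--     return out
-- ===== Notes on version B (the rewrite author's own statement) =====
-- stated objective: simpler
-- what changed: Replaces the list-slicing recursion with unit-step while loops by a single iterative pass over consecutive pairs (zip) that emits each gap as one range() call.
import Mathlib
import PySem

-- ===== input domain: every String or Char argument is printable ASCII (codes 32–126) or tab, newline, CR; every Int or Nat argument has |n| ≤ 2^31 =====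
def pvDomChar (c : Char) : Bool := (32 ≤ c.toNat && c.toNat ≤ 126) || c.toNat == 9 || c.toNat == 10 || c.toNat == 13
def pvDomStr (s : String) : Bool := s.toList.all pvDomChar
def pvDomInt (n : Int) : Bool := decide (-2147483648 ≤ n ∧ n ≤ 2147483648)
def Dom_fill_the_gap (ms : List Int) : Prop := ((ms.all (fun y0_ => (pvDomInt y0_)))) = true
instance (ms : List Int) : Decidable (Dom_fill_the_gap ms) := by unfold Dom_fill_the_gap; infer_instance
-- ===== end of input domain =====

-- B replaces A's list-slicing recursion and unit-step while loops by one iterative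
-- pass over consecutive pairs that emits each gap as a single range; same values.

-- ===== PORT A =====
-- 'while last > nxt: last -= 1; ns.append(last)'
def whileDown (last nxt : Int) (ns : List Int) : List Int :=
  if last > nxt then whileDown (last - 1) nxt (ns ++ [last - 1]) else ns
termination_by (last - nxt).toNat
decreasing_by omega

-- 'while last < nxt: last += 1; ns.append(last)'
def whileUp (last nxt : Int) (ns : List Int) : List Int :=
  if last < nxt then whileUp (last + 1) nxt (ns ++ [last + 1]) else ns
termination_by (nxt - last).toNat
decreasing_by omega

-- the inner 'def loop(ms, ns)'; ns is nonempty at every call, so the '.getD 0'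
-- (Python would raise IndexError on []) is never taken
def loopA (ms ns : List Int) : List Int :=
  match ms with
  | [] => ns
  | nxt :: rest =>
    let last := (PySem.List.pyGet? ns ((ns.length : Int) - 1)).getD 0
    if last > nxt then loopA rest (whileDown last nxt ns)
    else if last < nxt then loopA rest (whileUp last nxt ns)
    else loopA rest (ns ++ [nxt])

def fill_the_gap (ms : List Int) : List Int :=
  match ms with
  | [] => []
  | m0 :: rest => loopA rest [m0]

-- ===== PORT B =====
-- body of the 'for a, b in zip(ms, ms[1:])' loop
def stepB (out : List Int) (p : Int × Int) : List Int :=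
  if p.1 < p.2 then out ++ PySem.List.pyRange (p.1 + 1) (p.2 + 1) 1
  else if p.1 > p.2 then out ++ PySem.List.pyRange (p.1 - 1) (p.2 - 1) (-1)
  else out ++ [p.2]

def fill_the_gap_alt (ms : List Int) : List Int :=
  match ms with
  | [] => []
  | m0 :: rest => ((m0 :: rest).zip rest).foldl stepB [m0]

-- ===== PRECONDITION & SPEC =====
def Spec_fill_the_gap (ms : List Int) (out : List Int) : Prop := out = fill_the_gap_alt ms
instance (ms : List Int) (out : List Int) : Decidable (Spec_fill_the_gap ms out) := by unfold Spec_fill_the_gap; infer_instance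

-- ===== CLAIM (what is proved, stated in full; the proofs are below) =====
def Claim_equal_fill_the_gap : Prop := ∀ (ms : List Int), Dom_fill_the_gap ms → Spec_fill_the_gap ms (fill_the_gap ms)

-- ===== LEMMAS AND PROOFS =====

-- the down-while appends exactly range(last-1, nxt-1, -1)
theorem whileDown_eq (last nxt : Int) (ns : List Int) :
    whileDown last nxt ns = ns ++ PySem.List.pyRange (last - 1) (nxt - 1) (-1) := by
  by_cases h : last > nxt
  · rw [whileDown, if_pos h, whileDown_eq (last - 1) nxt (ns ++ [last - 1]),
      PySem.List.pyRange_neg_one_cons (by omega : nxt - 1 < last - 1)]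
    simp
  · rw [whileDown, if_neg h,
      PySem.List.pyRange_neg_one_eq_nil (by omega : last - 1 ≤ nxt - 1)]
    simp
termination_by (last - nxt).toNat
decreasing_by omega

-- the up-while appends exactly range(last+1, nxt+1, 1)
theorem whileUp_eq (last nxt : Int) (ns : List Int) :
    whileUp last nxt ns = ns ++ PySem.List.pyRange (last + 1) (nxt + 1) 1 := by
  by_cases h : last < nxt
  · rw [whileUp, if_pos h, whileUp_eq (last + 1) nxt (ns ++ [last + 1]),
      PySem.List.pyRange_one_cons (by omega : last + 1 < nxt + 1)]
    simp
  · rw [whileUp, if_neg h,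
      PySem.List.pyRange_one_eq_nil (by omega : nxt + 1 ≤ last + 1)]
    simp
termination_by (nxt - last).toNat
decreasing_by omega

-- ns[len(ns)-1] reads the last element
theorem pyGet_last (ns : List Int) (x : Int) (hx : ns.getLast? = some x) :
    (PySem.List.pyGet? ns ((ns.length : Int) - 1)).getD 0 = x := by
  have hne : ns ≠ [] := by intro h; simp [h] at hx
  have hlen : 1 ≤ ns.length := List.length_pos_of_ne_nil hne
  have : ((ns.length : Int) - 1) = ((ns.length - 1 : Nat) : Int) := by omega
  rw [this, PySem.List.pyGet?_natCast]
  rw [List.getLast?_eq_getElem?] at hx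
  simp [hx]

theorem loopA_eq (ms : List Int) : ∀ (ns : List Int) (x : Int), ns.getLast? = some x →
    loopA ms ns = ((x :: ms).zip ms).foldl stepB ns := by
  induction ms with
  | nil => intro ns x _; simp [loopA]
  | cons nxt rest ih =>
    intro ns x hx
    have hzip : (x :: nxt :: rest).zip (nxt :: rest)
        = (x, nxt) :: (nxt :: rest).zip rest := by simp [List.zip]
    rw [hzip]
    show loopA (nxt :: rest) ns = _
    rw [loopA]
    simp only [pyGet_last ns x hx, List.foldl_cons]
    rcases lt_trichotomy x nxt with h | h | h
    · rw [if_neg (by omega), if_pos h, whileUp_eq]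
      rw [ih (ns ++ PySem.List.pyRange (x + 1) (nxt + 1) 1) nxt ?_]
      · simp only [stepB, if_pos h]
      · rw [PySem.List.pyRange_one_succ_right (by omega : x + 1 ≤ nxt)]
        simp
    · subst h
      rw [if_neg (by omega), if_neg (by omega)]
      rw [ih (ns ++ [x]) x (by simp)]
      simp [stepB]
    · rw [if_pos h, whileDown_eq]
      rw [ih (ns ++ PySem.List.pyRange (x - 1) (nxt - 1) (-1)) nxt ?_]
      · simp only [stepB, if_neg (by omega : ¬ x < nxt), if_pos h]
      · rw [PySem.List.pyRange_neg_one_eq_reverse,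
          PySem.List.pyRange_one_cons (by omega : nxt - 1 + 1 < x - 1 + 1)]
        simp

-- ===== VERDICT (by name: the statement is the Claim_ definition above) =====
theorem fill_the_gap_spec : Claim_equal_fill_the_gap := by
  intro ms _
  unfold Spec_fill_the_gap fill_the_gap fill_the_gap_alt
  match ms with
  | [] => rfl
  | m0 :: rest => exact loopA_eq rest [m0] m0 (by simp)
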